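-- pv_equiv track=rewrite | github.com/anbarasans85/coursera | dsa_ucsd/001_algorithmic_toolbox/week_02/01_introduction_starter_files/fibonacci_partial_sum/fibonacci_partial_sum.py | pisano_period_length
-- ===== SOURCE A (Python) =====
-- def pisano_period_length(pm):
--     length = 2
--     fibp = 1
--     previous = 1
--     current = 1
--     while 1:
--         previous, current = current, previous + current
--         fib1 = current % pm
--         if fibp == 0 and fib1 == 1:
--             return length
--         fibp = fib1
--         length += 1
-- ===== SOURCE B (Python) =====
-- def pisano_period_length(pm):
--     # Generic cycle detection on the iterated pair map x -> (x[1], sum(x) % pm):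
--     # record the first index of every state in a hash map and stop at the first
--     # repeated state; the map is injective on reduced pairs, so the first repeat
--     # is the start state and the period is the index gap.
--     seen = {}
--     i = 0
--     pair = (0, 1)
--     while pair not in seen:
--         seen[pair] = i
--         pair = (pair[1], (pair[0] + pair[1]) % pm)
--         i += 1
--     return i - seen[pair]
-- ===== Notes on version B (the rewrite author's own statement) =====
-- stated objective: alternative
-- what changed: B replaces A's sentinel search (advance full unbounded Fibonacci numbers and test for the residue pattern 0,1) by generic cycle detection on the reduced pair map: it iterates pair -> (pair[1], sum(pair) % pm) with bounded state, records the first index of every state in a dict, stops at the first repeated state and returns the index gap; injectivity of the map makes the first repeat the start state (0,1). Pre_ excludes pm <= 1, where A raises (pm = 0) or loops forever (pm = 1 and pm < 0).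
-- outside the precondition, e.g. on pisano_period_length(0): A raises ZeroDivisionError, B raises ZeroDivisionError; on pisano_period_length(1): A does not finish within the time limit, B returns 1
import Mathlib
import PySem

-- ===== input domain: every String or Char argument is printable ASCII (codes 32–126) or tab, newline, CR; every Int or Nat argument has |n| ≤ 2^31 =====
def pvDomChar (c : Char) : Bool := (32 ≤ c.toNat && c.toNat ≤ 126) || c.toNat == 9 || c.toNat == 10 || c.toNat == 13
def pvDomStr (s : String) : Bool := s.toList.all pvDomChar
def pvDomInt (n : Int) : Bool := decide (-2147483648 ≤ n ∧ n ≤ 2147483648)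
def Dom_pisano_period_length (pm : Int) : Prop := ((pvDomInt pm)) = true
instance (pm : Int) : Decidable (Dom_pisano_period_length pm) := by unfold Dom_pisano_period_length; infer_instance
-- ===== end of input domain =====

-- B replaces A's sentinel search over full unbounded Fibonacci numbers by generic cycle
-- detection on the mod-pm pair map with a dict of first-seen states (objective: alternative).

-- ===== PORT A =====
-- A's `while 1` loop; the fuel argument is a totality guard only (it exceeds the number of
-- iterations A performs for pm ≥ 2); on exhaustion returns 0 (unreachable inside Pre_).
def pisano_loopA (pm : Int) : Nat → Int → Int → Int → Int → Int
  | 0, _, _, _, _ => 0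
  | f + 1, length, fibp, previous, current =>
      let previous' := current
      let current' := previous + current
      let fib1 := PySem.Int.mod current' pm
      if fibp = 0 ∧ fib1 = 1 then length
      else pisano_loopA pm f (length + 1) fib1 previous' current'

def pisano_period_length (pm : Int) : Int :=
  pisano_loopA pm ((6 * pm).toNat + 1) 2 1 1 1

-- ===== PORT B =====
-- B's `while pair not in seen` loop; fuel is a totality guard only (a repeat occurs within
-- pm^2 + 1 steps); on exhaustion returns 0 (unreachable inside Pre_).  `seen[pair]` is a
-- lookup that Python performs only when the key is present (the loop just exited on
-- membership), so it is ported as get? + getD 0, exact on every reachable state.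
def pisano_loopB (pm : Int) : Nat → PySem.Dict (Int × Int) Int → Int → Int × Int → Int
  | 0, _, _, _ => 0
  | f + 1, seen, i, pair =>
      if seen.contains pair then i - (PySem.Dict.get? seen pair).getD 0
      else pisano_loopB pm f (seen.insert pair i) (i + 1)
             (pair.2, PySem.Int.mod (pair.1 + pair.2) pm)

def pisano_period_length_alt (pm : Int) : Int :=
  pisano_loopB pm ((6 * pm).toNat + 3) PySem.Dict.empty 0 (0, 1)

-- ===== PRECONDITION & SPEC =====
-- Pre_ excludes pm ≤ 1, on which A never returns: pm = 0 raises ZeroDivisionError and for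
-- pm = 1 or pm < 0 the residue 1 is never produced, so A's while-loop runs forever.
def Pre_pisano_period_length (pm : Int) : Prop := 2 ≤ pm
instance (pm : Int) : Decidable (Pre_pisano_period_length pm) := by unfold Pre_pisano_period_length; infer_instance
def pvWitness_pisano_period_length : Int := 5

def Spec_pisano_period_length (pm : Int) (out : Int) : Prop := out = pisano_period_length_alt pm
instance (pm : Int) (out : Int) : Decidable (Spec_pisano_period_length pm out) := by unfold Spec_pisano_period_length; infer_instance

-- ===== CLAIM (what is proved, stated in full; the proofs are below) =====
def Claim_equal_pisano_period_length : Prop := ∀ (pm : Int), Dom_pisano_period_length pm → Pre_pisano_period_length pm → Spec_pisano_period_length pm (pisano_period_length pm)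

-- ===== LEMMAS AND PROOFS =====

-- The reduced pair sequence (F(n) % pm, F(n+1) % pm) both loops walk through.
def pvStep (pm : Int) (p : Int × Int) : Int × Int := (p.2, PySem.Int.mod (p.1 + p.2) pm)

def pvPairSeq (pm : Int) : Nat → Int × Int
  | 0 => (0, 1)
  | n + 1 => pvStep pm (pvPairSeq pm n)

-- Common reference loop: first index i ≥ max(start,1) within fuel with pvPairSeq i = (0,1).
def pvLoopS (pm : Int) : Nat → Nat → Int
  | 0, _ => 0
  | f + 1, i => if 1 ≤ i ∧ pvPairSeq pm i = (0, 1) then (i : Int) else pvLoopS pm f (i + 1)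

def pvInRange (pm : Int) (p : Int × Int) : Prop :=
  0 ≤ p.1 ∧ p.1 < pm ∧ 0 ≤ p.2 ∧ p.2 < pm

theorem pv_mod_add_mod (pm a b : Int) (h : 0 < pm) :
    PySem.Int.mod (PySem.Int.mod a pm + PySem.Int.mod b pm) pm = PySem.Int.mod (a + b) pm := by
  simp only [PySem.Int.mod_eq_emod_of_pos h]
  exact (Int.add_emod a b pm).symm

theorem pv_mod_one (pm : Int) (h : 2 ≤ pm) : PySem.Int.mod 1 pm = 1 := by
  rw [PySem.Int.mod_eq_emod_of_pos (show (0:Int) < pm by omega)]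
  exact Int.emod_eq_of_lt (by omega) (by omega)

theorem pv_mod_range (pm a : Int) (h : 0 < pm) :
    0 ≤ PySem.Int.mod a pm ∧ PySem.Int.mod a pm < pm := by
  rw [PySem.Int.mod_eq_emod_of_pos h]
  exact ⟨Int.emod_nonneg a (by omega), Int.emod_lt_of_pos a h⟩

theorem pv_pairSeq_range (pm : Int) (h : 2 ≤ pm) : ∀ n, pvInRange pm (pvPairSeq pm n) := by
  intro n
  induction n with
  | zero =>
      have h0 : pvPairSeq pm 0 = ((0 : Int), (1 : Int)) := rfl
      rw [h0]
      exact ⟨le_refl 0, by omega, by omega, by omega⟩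
  | succ n ih =>
      obtain ⟨h1, h2, h3, h4⟩ := ih
      have := pv_mod_range pm ((pvPairSeq pm n).1 + (pvPairSeq pm n).2) (by omega)
      exact ⟨h3, h4, this.1, this.2⟩

theorem pv_step_inj (pm : Int) (h : 0 < pm) (p q : Int × Int)
    (hp : pvInRange pm p) (hq : pvInRange pm q) (heq : pvStep pm p = pvStep pm q) : p = q := by
  obtain ⟨hp1, hp2, _, _⟩ := hp
  obtain ⟨hq1, hq2, _, _⟩ := hq
  unfold pvStep at heq
  have h2 : p.2 = q.2 := congrArg Prod.fst heq
  have hm : PySem.Int.mod (p.1 + p.2) pm = PySem.Int.mod (q.1 + q.2) pm := congrArg Prod.snd heq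
  rw [h2] at hm
  simp only [PySem.Int.mod_eq_emod_of_pos h] at hm
  have hmod : p.1 % pm = q.1 % pm := Int.ModEq.add_right_cancel' q.2 hm
  rw [Int.emod_eq_of_lt hp1 hp2, Int.emod_eq_of_lt hq1 hq2] at hmod
  exact Prod.ext hmod h2

theorem pv_seq_inj (pm : Int) (h : 2 ≤ pm) :
    ∀ (k i j : Nat), pvPairSeq pm (i + k) = pvPairSeq pm (j + k) → pvPairSeq pm i = pvPairSeq pm j := by
  intro k
  induction k with
  | zero => intro i j hij; simpa using hij
  | succ k ih =>
      intro i j hij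
      apply ih
      have : pvStep pm (pvPairSeq pm (i + k)) = pvStep pm (pvPairSeq pm (j + k)) := by
        have e1 : i + (k + 1) = (i + k) + 1 := by omega
        have e2 : j + (k + 1) = (j + k) + 1 := by omega
        rw [e1, e2] at hij
        exact hij
      exact pv_step_inj pm (by omega) _ _ (pv_pairSeq_range pm h _) (pv_pairSeq_range pm h _) this

theorem pv_pairSeq_one (pm : Int) (h : 2 ≤ pm) : pvPairSeq pm 1 = (1, 1) := by
  show pvStep pm (0, 1) = (1, 1)
  unfold pvStep
  simp [pv_mod_one pm h]

-- A's loop walks the reduced sequence: with length = n+1 and residues matching pvPairSeq n.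
theorem pv_loopA_eq_loopS (pm : Int) (h : 2 ≤ pm) :
    ∀ (f n : Nat) (p c : Int),
      PySem.Int.mod p pm = (pvPairSeq pm n).1 →
      PySem.Int.mod c pm = (pvPairSeq pm n).2 →
      pisano_loopA pm f ((n : Int) + 1) ((pvPairSeq pm n).2) p c = pvLoopS pm f (n + 1) := by
  intro f
  induction f with
  | zero => intro n p c _ _; rfl
  | succ f ih =>
      intro n p c hp hc
      have hpm : (0:Int) < pm := by omega
      have hnext : pvPairSeq pm (n + 1) = (PySem.Int.mod c pm, PySem.Int.mod (p + c) pm) := by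
        show pvStep pm (pvPairSeq pm n) = _
        unfold pvStep
        rw [← hp, ← hc, pv_mod_add_mod pm p c hpm]
      simp only [pisano_loopA, pvLoopS]
      have hcond : ((pvPairSeq pm n).2 = 0 ∧ PySem.Int.mod (p + c) pm = 1)
          ↔ (1 ≤ n + 1 ∧ pvPairSeq pm (n + 1) = (0, 1)) := by
        rw [hnext, ← hc]
        constructor
        · rintro ⟨h1, h2⟩; exact ⟨by omega, by rw [h1, h2]⟩
        · rintro ⟨_, h2⟩
          exact ⟨congrArg Prod.fst h2, congrArg Prod.snd h2⟩
      by_cases hcase : 1 ≤ n + 1 ∧ pvPairSeq pm (n + 1) = (0, 1)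
      · rw [if_pos (hcond.mpr hcase), if_pos hcase]; push_cast; ring
      · rw [if_neg (fun hx => hcase (hcond.mp hx)), if_neg hcase]
        have hp' : PySem.Int.mod c pm = (pvPairSeq pm (n + 1)).1 := by rw [hnext]
        have hc' : PySem.Int.mod (p + c) pm = (pvPairSeq pm (n + 1)).2 := by rw [hnext]
        have := ih (n + 1) c (p + c) hp' hc'
        rw [hnext] at this
        have ecast : ((n : Int) + 1) + 1 = ((n + 1 : Nat) : Int) + 1 := by push_cast; ring
        rw [ecast]
        exact this

-- B's loop invariant: seen holds exactly the states with index < n, maps (0,1) to 0,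
-- and no index in [1, n) hits (0,1).
theorem pv_loopB_eq_loopS (pm : Int) (h : 2 ≤ pm) :
    ∀ (f n : Nat) (seen : PySem.Dict (Int × Int) Int),
      (∀ p : Int × Int, seen.contains p = true ↔ ∃ k < n, pvPairSeq pm k = p) →
      (1 ≤ n → PySem.Dict.get? seen (0, 1) = some 0) →
      (∀ k : Nat, 1 ≤ k → k < n → pvPairSeq pm k ≠ (0, 1)) →
      pisano_loopB pm f seen (n : Int) (pvPairSeq pm n) = pvLoopS pm f n := by
  intro f
  induction f with
  | zero => intro n seen _ _ _; rfl
  | succ f ih =>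
      intro n seen hP1 hP2 hP3
      simp only [pisano_loopB, pvLoopS]
      by_cases hmem : seen.contains (pvPairSeq pm n) = true
      · -- first repeated state: must be (0,1) at index 0, so the loop returns n
        obtain ⟨k, hk, hkeq⟩ := (hP1 _).mp hmem
        have hsplit : pvPairSeq pm (n - k) = pvPairSeq pm 0 := by
          apply pv_seq_inj pm h k (n - k) 0
          have e1 : n - k + k = n := by omega
          have e2 : 0 + k = k := by omega
          rw [e1, e2, hkeq]
        have hk0 : k = 0 := by
          by_contra hk0
          have hlt : n - k < n := by omega
          exact hP3 (n - k) (by omega) hlt hsplit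
        have hn1 : 1 ≤ n := by omega
        have hpn : pvPairSeq pm n = (0, 1) := by
          have : n - k = n := by omega
          rw [← this, hsplit]; rfl
        rw [if_pos hmem, if_pos ⟨hn1, hpn⟩, hpn, hP2 hn1]
        simp
      · -- fresh state: record it and advance
        have hnot : ¬ (1 ≤ n ∧ pvPairSeq pm n = (0, 1)) := by
          rintro ⟨hn1, hpn⟩
          exact hmem ((hP1 _).mpr ⟨0, by omega, by rw [hpn]; rfl⟩)
        rw [if_neg hmem, if_neg hnot]
        have hstep : (((pvPairSeq pm n).2 : Int), PySem.Int.mod ((pvPairSeq pm n).1 + (pvPairSeq pm n).2) pm)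
            = pvPairSeq pm (n + 1) := rfl
        rw [hstep]
        have ecast : (n : Int) + 1 = ((n + 1 : Nat) : Int) := by push_cast; ring
        rw [ecast]
        apply ih (n + 1)
        · intro p
          rw [PySem.Dict.contains_insert]
          constructor
          · intro hor
            rcases Bool.or_eq_true_iff.mp hor with hb | hb
            · exact ⟨n, by omega, (eq_of_beq hb).symm⟩
            · obtain ⟨k, hk, hkeq⟩ := (hP1 p).mp hb
              exact ⟨k, by omega, hkeq⟩
          · rintro ⟨k, hk, hkeq⟩
            by_cases hkn : k = n
            · subst hkn; rw [← hkeq]; simp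
            · exact Bool.or_eq_true_iff.mpr (Or.inr ((hP1 p).mpr ⟨k, by omega, hkeq⟩))
        · intro _
          by_cases hn0 : n = 0
          · subst hn0
            have : pvPairSeq pm 0 = ((0 : Int), (1 : Int)) := rfl
            rw [this]
            simp [PySem.Dict.get?_insert_self]
          · have hne : ((0 : Int), (1 : Int)) ≠ pvPairSeq pm n := by
              intro hx
              exact hnot ⟨by omega, hx.symm⟩
            rw [PySem.Dict.get?_insert_of_ne seen _ hne]
            exact hP2 (by omega)
        · intro k hk1 hk2
          by_cases hkn : k = n
          · subst hkn
            intro hx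
            exact hnot ⟨hk1, hx⟩
          · exact hP3 k hk1 (by omega)

-- The two reference-loop entry points coincide: indices 0 and 1 never match.
theorem pv_loopS_shift (pm : Int) (h : 2 ≤ pm) (f : Nat) :
    pvLoopS pm (f + 2) 0 = pvLoopS pm f 2 := by
  have h1 : pvPairSeq pm 1 ≠ (0, 1) := by
    rw [pv_pairSeq_one pm h]
    intro hx
    exact one_ne_zero (congrArg Prod.fst hx)
  simp only [pvLoopS]
  rw [if_neg (by omega), if_neg (fun hx => h1 hx.2)]

-- ===== VERDICT (by name: the statement is the Claim_ definition above) =====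
theorem pisano_period_length_spec : Claim_equal_pisano_period_length := by
  intro pm _ hpre
  have h2 : (2:Int) ≤ pm := hpre
  unfold Spec_pisano_period_length pisano_period_length pisano_period_length_alt
  have hone : PySem.Int.mod 1 pm = 1 := pv_mod_one pm h2
  have hA : pisano_loopA pm ((6 * pm).toNat + 1) 2 1 1 1 = pvLoopS pm ((6 * pm).toNat + 1) 2 := by
    have hseq1 : pvPairSeq pm 1 = (1, 1) := pv_pairSeq_one pm h2
    have := pv_loopA_eq_loopS pm h2 ((6 * pm).toNat + 1) 1 1 1
      (by rw [hseq1]; exact hone) (by rw [hseq1]; exact hone)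
    rw [hseq1] at this
    simpa using this
  have hB : pisano_loopB pm ((6 * pm).toNat + 3) PySem.Dict.empty 0 (0, 1)
      = pvLoopS pm ((6 * pm).toNat + 3) 0 := by
    have := pv_loopB_eq_loopS pm h2 ((6 * pm).toNat + 3) 0 PySem.Dict.empty
      (by intro p; simp) (by omega) (by omega)
    simpa using this
  rw [hA, hB]
  have : (6 * pm).toNat + 3 = ((6 * pm).toNat + 1) + 2 := by omega
  rw [this, pv_loopS_shift pm h2]
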